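-- pv_equiv track=rewrite | github.com/arvkevi/rprec | rprec/scrape.py | process_slugs
-- ===== SOURCE A (Python) =====
-- def process_slugs(slugs):
--     """Creates a dictionary of slugs by type: (article, interview, courses)
--
--     :param slugs: List of article slugs
--     :type slugs: list
--     :return: Dictionary of article slugs separated by category
--     :rtype: dict
--     """
--     slugs_by_type = {
--         "articles": [],
--         "courses": [],
--         "interviews": [],
--     }
--     for slug in slugs:
--         if slug.startswith("courses/"):
--             slugs_by_type["courses"].append(slug[8:])
--         elif slug.startswith("interview"):
--             slugs_by_type["interviews"].append(slug)
--         else: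
--             slugs_by_type["articles"].append(slug)
--
--     return slugs_by_type
-- ===== SOURCE B (Python) =====
-- def process_slugs(slugs):
--     """Three independent filter passes instead of one branching loop."""
--     return {
--         "articles": [s for s in slugs
--                      if not s.startswith("courses/") and not s.startswith("interview")],
--         "courses": [s[8:] for s in slugs if s.startswith("courses/")],
--         "interviews": [s for s in slugs if s.startswith("interview")],
--     }
-- ===== Notes on version B (the rewrite author's own statement) =====
-- stated objective: alternative
-- what changed: Replaces the single branching loop that appends into a pre-built dict with three independent filter comprehensions (one per category) assembled directly into the result dict; correctness relies on the 'courses/' and 'interview' prefixes being mutually exclusive.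
import Mathlib
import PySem

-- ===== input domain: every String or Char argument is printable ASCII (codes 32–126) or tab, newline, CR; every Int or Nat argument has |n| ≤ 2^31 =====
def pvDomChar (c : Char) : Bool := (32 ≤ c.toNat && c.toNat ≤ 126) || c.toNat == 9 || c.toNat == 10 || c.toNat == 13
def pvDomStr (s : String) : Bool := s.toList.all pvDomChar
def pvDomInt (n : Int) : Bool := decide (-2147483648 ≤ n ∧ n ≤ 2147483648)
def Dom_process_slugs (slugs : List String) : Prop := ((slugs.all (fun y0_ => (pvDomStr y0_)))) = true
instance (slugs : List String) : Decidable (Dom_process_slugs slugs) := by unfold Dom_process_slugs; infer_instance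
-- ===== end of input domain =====

-- B replaces A's single branching loop (appending into a pre-built dict) with three
-- independent filter passes, one per category; return-value equivalence only.

-- ===== PORT A =====
def process_slugs (slugs : List String) : List (String × List String) :=
  let d0 : PySem.Dict String (List String) :=
    PySem.Dict.ofList [("articles", []), ("courses", []), ("interviews", [])]
  let d := slugs.foldl (fun d slug =>
    if PySem.Str.startswith slug "courses/" then
      d.modify "courses" [] (· ++ [PySem.Str.slice slug (some 8) none])
    else if PySem.Str.startswith slug "interview" then
      d.modify "interviews" [] (· ++ [slug])
    else
      d.modify "articles" [] (· ++ [slug])) d0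
  d.items

-- ===== PORT B =====
def process_slugs_alt (slugs : List String) : List (String × List String) :=
  [("articles", slugs.filter (fun s =>
      !PySem.Str.startswith s "courses/" && !PySem.Str.startswith s "interview")),
   ("courses", (slugs.filter (fun s => PySem.Str.startswith s "courses/")).map
      (fun s => PySem.Str.slice s (some 8) none)),
   ("interviews", slugs.filter (fun s => PySem.Str.startswith s "interview"))]

-- ===== PRECONDITION & SPEC =====
def Spec_process_slugs (slugs : List String) (out : List (String × List String)) : Prop := out = process_slugs_alt slugs
instance (slugs : List String) (out : List (String × List String)) : Decidable (Spec_process_slugs slugs out) := by unfold Spec_process_slugs; infer_instance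

-- ===== CLAIM (what is proved, stated in full; the proofs are below) =====
def Claim_equal_process_slugs : Prop := ∀ (slugs : List String), Dom_process_slugs slugs → Spec_process_slugs slugs (process_slugs slugs)

-- ===== LEMMAS AND PROOFS =====

-- A slug cannot start with both "courses/" and "interview".
lemma not_both_prefixes (s : String)
    (hc : PySem.Str.startswith s "courses/" = true) :
    PySem.Str.startswith s "interview" = false := by
  by_contra h
  rw [Bool.not_eq_false] at h
  simp only [PySem.Str.startswith_eq, PySem.Chars.startswith_iff] at hc h
  obtain ⟨t1, h1⟩ := hc
  obtain ⟨t2, h2⟩ := h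
  rw [← h1] at h2
  simp at h2

-- Evaluating Dict.modify on the literal three-key dict (key comparisons reduce).
lemma mod_courses (a c i : List String) (f : List String → List String) :
    (PySem.Dict.mk [("articles", a), ("courses", c), ("interviews", i)]).modify "courses" [] f
    = PySem.Dict.mk [("articles", a), ("courses", f c), ("interviews", i)] := by
  simp [PySem.Dict.modify, PySem.Dict.getD, PySem.Dict.get?, PySem.Dict.insert,
    PySem.Dict.contains]

lemma mod_interviews (a c i : List String) (f : List String → List String) :
    (PySem.Dict.mk [("articles", a), ("courses", c), ("interviews", i)]).modify "interviews" [] f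
    = PySem.Dict.mk [("articles", a), ("courses", c), ("interviews", f i)] := by
  simp [PySem.Dict.modify, PySem.Dict.getD, PySem.Dict.get?, PySem.Dict.insert,
    PySem.Dict.contains]

lemma mod_articles (a c i : List String) (f : List String → List String) :
    (PySem.Dict.mk [("articles", a), ("courses", c), ("interviews", i)]).modify "articles" [] f
    = PySem.Dict.mk [("articles", f a), ("courses", c), ("interviews", i)] := by
  simp [PySem.Dict.modify, PySem.Dict.getD, PySem.Dict.get?, PySem.Dict.insert,
    PySem.Dict.contains]

-- The fold with a three-key literal dict, characterised for any accumulator contents.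
lemma fold_items (slugs : List String) (a c i : List String) :
    (slugs.foldl (fun d slug =>
        if PySem.Str.startswith slug "courses/" then
          d.modify "courses" [] (· ++ [PySem.Str.slice slug (some 8) none])
        else if PySem.Str.startswith slug "interview" then
          d.modify "interviews" [] (· ++ [slug])
        else
          d.modify "articles" [] (· ++ [slug]))
      (PySem.Dict.mk [("articles", a), ("courses", c), ("interviews", i)])).items
    = [("articles", a ++ slugs.filter (fun s =>
          !PySem.Str.startswith s "courses/" && !PySem.Str.startswith s "interview")),
       ("courses", c ++ (slugs.filter (fun s => PySem.Str.startswith s "courses/")).map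
          (fun s => PySem.Str.slice s (some 8) none)),
       ("interviews", i ++ slugs.filter (fun s => PySem.Str.startswith s "interview"))] := by
  induction slugs generalizing a c i with
  | nil => simp
  | cons s rest ih =>
    by_cases hc : PySem.Str.startswith s "courses/" = true
    · have hi := not_both_prefixes s hc
      rw [List.foldl_cons, if_pos hc, mod_courses, ih]
      simp only [List.filter_cons, hc, hi, Bool.not_true, Bool.not_false, Bool.and_true,
        Bool.false_eq_true, if_false, if_true, List.map_cons]
      simp [List.append_assoc]
    · rw [Bool.not_eq_true] at hc
      by_cases hi : PySem.Str.startswith s "interview" = true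
      · rw [List.foldl_cons, if_neg (by rw [hc]; simp), if_pos hi, mod_interviews, ih]
        simp only [List.filter_cons, hc, hi, Bool.not_true, Bool.not_false,
          Bool.and_false, Bool.false_eq_true, if_false, if_true]
        simp [List.append_assoc]
      · rw [Bool.not_eq_true] at hi
        rw [List.foldl_cons, if_neg (by rw [hc]; simp), if_neg (by rw [hi]; simp), mod_articles, ih]
        simp only [List.filter_cons, hc, hi, Bool.not_false,
          Bool.and_true, Bool.false_eq_true, if_false, if_true]
        simp [List.append_assoc]

-- ===== VERDICT (by name: the statement is the Claim_ definition above) =====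
theorem process_slugs_spec : Claim_equal_process_slugs := by
  intro slugs _
  show process_slugs slugs = process_slugs_alt slugs
  unfold process_slugs process_slugs_alt
  have h := fold_items slugs [] [] []
  simpa [PySem.Dict.ofList] using h
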